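-- pv_equiv track=rewrite | github.com/VishalMahato/Nexora-AI | app/chat/router.py | _missing_action_slots
-- ===== SOURCE A (Python) =====
-- def _missing_action_slots(
--     intent_type: str,
--     slots: dict[str, str],
--     base_missing: list[str] | None,
-- ) -> list[str]:
--     missing = [slot for slot in (base_missing or []) if not slots.get(slot)]
--     intent = intent_type.upper()
--     if intent == "SWAP":
--         if not slots.get("token_in"):
--             missing.append("token_in")
--         if not slots.get("token_out"):
--             missing.append("token_out")
--         amount = slots.get("amount_in") or slots.get("amount")
--         if not amount:
--             missing.append("amount_in")
--     return list(dict.fromkeys(missing))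
-- ===== SOURCE B (Python) =====
-- def _missing_action_slots(
--     intent_type: str,
--     slots: dict[str, str],
--     base_missing: list[str] | None,
-- ) -> list[str]:
--     # data-driven: one requirements spec, one uniform pass with a seen-set
--     spec = [(slot, (slot,)) for slot in (base_missing or [])]
--     if intent_type.upper() == "SWAP":
--         spec += [
--             ("token_in", ("token_in",)),
--             ("token_out", ("token_out",)),
--             ("amount_in", ("amount_in", "amount")),
--         ]
--     result = []
--     seen = set()
--     for label, keys in spec:
--         if label not in seen and not any(slots.get(k) for k in keys):
--             seen.add(label)
--             result.append(label)
--     return result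
-- ===== Notes on version B (the rewrite author's own statement) =====
-- stated objective: alternative
-- what changed: Replaced the base-list comprehension plus three hard-coded SWAP if-branches and a final dict.fromkeys dedup with a data-driven requirements table (label, candidate keys) scanned in one uniform pass that dedups on the fly with a seen-set.
import Mathlib
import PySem

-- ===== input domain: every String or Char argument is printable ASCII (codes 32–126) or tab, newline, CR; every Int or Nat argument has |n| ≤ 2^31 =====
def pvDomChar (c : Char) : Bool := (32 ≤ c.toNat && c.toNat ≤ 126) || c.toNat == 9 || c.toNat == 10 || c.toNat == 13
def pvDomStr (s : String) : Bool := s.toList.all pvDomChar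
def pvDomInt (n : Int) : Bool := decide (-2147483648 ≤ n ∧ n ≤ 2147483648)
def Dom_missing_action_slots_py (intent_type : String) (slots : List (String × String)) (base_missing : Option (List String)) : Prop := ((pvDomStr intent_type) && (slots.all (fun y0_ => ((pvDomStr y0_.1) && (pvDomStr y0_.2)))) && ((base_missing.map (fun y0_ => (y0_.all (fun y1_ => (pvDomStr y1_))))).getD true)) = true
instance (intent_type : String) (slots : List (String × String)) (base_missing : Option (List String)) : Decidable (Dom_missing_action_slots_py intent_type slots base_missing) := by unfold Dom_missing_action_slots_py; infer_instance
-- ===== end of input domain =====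

-- B replaces A's three hard-coded SWAP branches and final dict.fromkeys dedup by a
-- data-driven (label, candidate-keys) table scanned in one pass with a seen-set (objective: alternative).


-- slots.get(k): first-match lookup; truthiness of the result ('not slots.get(k)'):
def pvSlotTruthy (slots : List (String × String)) (k : String) : Bool :=
  match (slots.find? (fun p => p.1 == k)).map Prod.snd with
  | some v => v != ""
  | none => false

-- ===== PORT A =====
def missing_action_slots_py (intent_type : String) (slots : List (String × String)) (base_missing : Option (List String)) : List String :=
  let missing := (base_missing.getD []).filter (fun slot => !pvSlotTruthy slots slot)
  let intent := PySem.Str.upper intent_type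
  let missing :=
    if intent == "SWAP" then
      let missing := if !pvSlotTruthy slots "token_in" then missing ++ ["token_in"] else missing
      let missing := if !pvSlotTruthy slots "token_out" then missing ++ ["token_out"] else missing
      -- amount = slots.get("amount_in") or slots.get("amount"); if not amount: …
      if !(pvSlotTruthy slots "amount_in" || pvSlotTruthy slots "amount") then missing ++ ["amount_in"] else missing
    else missing
  PySem.List.dedup missing

-- ===== PORT B =====
def missing_action_slots_py_alt (intent_type : String) (slots : List (String × String)) (base_missing : Option (List String)) : List String :=
  let spec : List (String × List String) :=
    ((base_missing.getD []).map (fun slot => (slot, [slot]))) ++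
      (if PySem.Str.upper intent_type == "SWAP" then
        [("token_in", ["token_in"]), ("token_out", ["token_out"]), ("amount_in", ["amount_in", "amount"])]
      else [])
  (spec.foldl
    (fun (acc : List String × PySem.Set String) e =>
      if !(PySem.Set.contains acc.2 e.1) && !(e.2.any (fun k => pvSlotTruthy slots k)) then
        (acc.1 ++ [e.1], PySem.Set.add acc.2 e.1)
      else acc)
    ([], PySem.Set.empty)).1

-- ===== PRECONDITION & SPEC =====
def Spec_missing_action_slots_py (intent_type : String) (slots : List (String × String)) (base_missing : Option (List String)) (out : List String) : Prop := out = missing_action_slots_py_alt intent_type slots base_missing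
instance (intent_type : String) (slots : List (String × String)) (base_missing : Option (List String)) (out : List String) : Decidable (Spec_missing_action_slots_py intent_type slots base_missing out) := by unfold Spec_missing_action_slots_py; infer_instance

-- ===== CLAIM (what is proved, stated in full; the proofs are below) =====
def Claim_equal_missing_action_slots_py : Prop := ∀ (intent_type : String) (slots : List (String × String)) (base_missing : Option (List String)), Dom_missing_action_slots_py intent_type slots base_missing → Spec_missing_action_slots_py intent_type slots base_missing (missing_action_slots_py intent_type slots base_missing)

-- ===== LEMMAS AND PROOFS =====

-- B's one-pass fold over the spec, started with equal out/seen lists, is the Set.add fold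
-- (= ordered dedup) over the labels of the entries whose candidate keys are all falsy.
theorem pvFold_eq_dedup (slots : List (String × String)) :
    ∀ (L : List (String × List String)) (out : List String),
      (L.foldl
        (fun (acc : List String × PySem.Set String) e =>
          if !(PySem.Set.contains acc.2 e.1) && !(e.2.any (fun k => pvSlotTruthy slots k)) then
            (acc.1 ++ [e.1], PySem.Set.add acc.2 e.1)
          else acc)
        (out, out)).1
      = ((L.filter (fun e => !(e.2.any (fun k => pvSlotTruthy slots k)))).map Prod.fst).foldl
          PySem.Set.add out := by
  intro L
  induction L with
  | nil => intro out; rfl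
  | cons e L ih =>
    intro out
    rw [List.foldl_cons]
    by_cases hm : (e.2.any (fun k => pvSlotTruthy slots k)) = true
    · rw [if_neg (by simp [hm]), List.filter_cons_of_neg (by simp [hm])]
      exact ih out
    · simp only [Bool.not_eq_true] at hm
      rw [List.filter_cons_of_pos (by simp [hm]), List.map_cons, List.foldl_cons]
      by_cases hc : (PySem.Set.contains out e.1) = true
      · have hadd : PySem.Set.add out e.1 = out := by
          unfold PySem.Set.add; rw [if_pos hc]
        rw [if_neg (by simp [hm]; simpa using hc), hadd]
        exact ih out
      · have hadd : PySem.Set.add out e.1 = out ++ [e.1] := by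
          unfold PySem.Set.add
          rw [if_neg (by simpa using hc)]
        rw [if_pos (by simp [hm]; simpa using hc), hadd]
        exact ih (out ++ [e.1])

theorem missing_action_slots_py_eq (intent_type : String) (slots : List (String × String)) (base_missing : Option (List String)) :
    missing_action_slots_py intent_type slots base_missing
      = missing_action_slots_py_alt intent_type slots base_missing := by
  simp only [missing_action_slots_py, missing_action_slots_py_alt, PySem.Set.empty]
  rw [pvFold_eq_dedup]
  rw [PySem.List.dedup_eq_ofList, PySem.Set.ofList_eq_foldl]
  congr 1
  by_cases hs : (PySem.Str.upper intent_type == "SWAP") = true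
  · simp only [hs, if_true, List.filter_append, List.map_append, List.filter_map]
    by_cases h1 : (pvSlotTruthy slots "token_in") = true <;>
    by_cases h2 : (pvSlotTruthy slots "token_out") = true <;>
    by_cases h3 : (pvSlotTruthy slots "amount_in" || pvSlotTruthy slots "amount") = true <;>
      simp [List.map_map, Function.comp_def, h1, h2, h3, List.append_assoc]
  · simp [hs, List.filter_map, Function.comp_def]

-- ===== VERDICT (by name: the statement is the Claim_ definition above) =====
theorem missing_action_slots_py_spec : Claim_equal_missing_action_slots_py := by
  intro intent_type slots base_missing _
  exact missing_action_slots_py_eq intent_type slots base_missing
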